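-- pv_equiv track=rewrite | github.com/boris-pichugin/yumsh | Уроки/2022-2023 8к/2022-09-17/hw.2.py | _compute_period
-- ===== SOURCE A (Python) =====
-- def _compute_period(a: int, b: int, q: int) -> tuple[int, int]:
--     """
--     Найти предпериод и период дроби a/b.
--
--     :param a: положительное целое число.
--     :param b: положительное целое число такое, что a < b.
--     :param q: основание системы счисления.
--     :return: длина предпериода и длина периода.
--     """
--     prefixes = {}
--     length = 0
--     while True:
--         if a == 0:
--             return length, 0
--         prefix = prefixes.get(a)
--         if prefix is not None:
--             return prefix, length - prefix
--         prefixes[a] = length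
--         a = (a * q) % b
--         length += 1
-- ===== SOURCE B (Python) =====
-- def _compute_period(a: int, b: int, q: int) -> tuple[int, int]:
--     """Pre-period and period of a/b in base q via Floyd cycle detection (O(1) memory, no dict)."""
--     if a == 0:
--         return 0, 0
--
--     def f(x: int) -> int:
--         return x * q % b
--
--     # Phase 1: tortoise/hare until they meet inside the cycle.
--     t = f(a)
--     h = f(f(a))
--     while t != h:
--         t = f(t)
--         h = f(f(h))
--     # Phase 2: pre-period length mu.
--     mu = 0
--     x = a
--     while x != h:
--         x = f(x)
--         h = f(h)
--         mu += 1
--     # Phase 3: period length lam (cycle of {0} means the expansion terminates).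
--     lam = 1
--     z = f(x)
--     while z != x:
--         z = f(z)
--         lam += 1
--     if x == 0:
--         return mu, 0
--     return mu, lam
-- ===== Notes on version B (the rewrite author's own statement) =====
-- stated objective: alternative
-- what changed: Replaces the dict-memoization first-repeat search with Floyd's tortoise-and-hare cycle detection (three short pointer loops, O(1) extra memory instead of a hash table of the whole trajectory), keeping A's quirk that a trajectory reaching 0 reports period 0.
import Mathlib
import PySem

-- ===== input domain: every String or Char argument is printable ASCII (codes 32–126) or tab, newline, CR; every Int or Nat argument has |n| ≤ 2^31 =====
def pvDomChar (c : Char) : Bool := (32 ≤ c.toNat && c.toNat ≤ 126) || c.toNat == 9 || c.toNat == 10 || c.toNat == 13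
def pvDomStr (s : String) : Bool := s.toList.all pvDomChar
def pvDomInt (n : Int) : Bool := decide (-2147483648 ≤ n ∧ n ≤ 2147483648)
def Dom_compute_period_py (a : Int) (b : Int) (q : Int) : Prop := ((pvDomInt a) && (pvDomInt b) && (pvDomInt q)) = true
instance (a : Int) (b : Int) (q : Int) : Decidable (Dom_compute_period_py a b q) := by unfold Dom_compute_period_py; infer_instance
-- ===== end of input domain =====

-- B replaces A's dict-memoization first-repeat search with Floyd's cycle detection (O(1) memory); return values agree wherever A returns.

-- one step of the trajectory: a ↦ (a * q) % b  (Python %)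
def pvStep (b q x : Int) : Int := PySem.Int.mod (x * q) b

-- ===== PORT A =====
-- fuel makes the 'while True' total; b.natAbs + 2 iterations always suffice (proved below)
def computeLoopA (b q : Int) : Nat → PySem.Dict Int Int → Int → Int → Int × Int
  | 0, _, _, _ => (0, 0)
  | fu+1, prefixes, a, len =>
    if a = 0 then (len, 0)
    else
      match prefixes.get? a with
      | some p => (p, len - p)
      | none => computeLoopA b q fu (prefixes.insert a len) (pvStep b q a) (len + 1)

def compute_period_py (a : Int) (b : Int) (q : Int) : Int × Int :=
  computeLoopA b q (b.natAbs + 2) PySem.Dict.empty a 0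

-- ===== PORT B =====
-- fueled 'while test: body' (fuel only makes it total; b.natAbs + 2 always suffices, proved below)
def pyWhile {α : Type} (test : α → Bool) (body : α → α) : Nat → α → α
  | 0, s => s
  | fu+1, s => if test s then pyWhile test body fu (body s) else s

def compute_period_py_alt (a : Int) (b : Int) (q : Int) : Int × Int :=
  if a = 0 then (0, 0)
  else
    let F := b.natAbs + 2
    -- Phase 1: tortoise/hare until they meet inside the cycle
    let th := pyWhile (fun s : Int × Int => s.1 != s.2)
        (fun s => (pvStep b q s.1, pvStep b q (pvStep b q s.2))) F
        (pvStep b q a, pvStep b q (pvStep b q a))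
    -- Phase 2: pre-period length mu
    let xm := pyWhile (fun s : Int × Int × Int => s.1 != s.2.1)
        (fun s => (pvStep b q s.1, pvStep b q s.2.1, s.2.2 + 1)) F
        (a, th.2, 0)
    -- Phase 3: period length lam
    let zl := pyWhile (fun s : Int × Int => s.1 != xm.1)
        (fun s => (pvStep b q s.1, s.2 + 1)) F
        (pvStep b q xm.1, 1)
    if xm.1 = 0 then (xm.2.2, 0) else (xm.2.2, zl.2)

-- ===== PRECONDITION & SPEC =====
-- Pre_ excludes exactly b = 0 with a ≠ 0, where Python A raises ZeroDivisionError (B raises there too)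
def Pre_compute_period_py (a : Int) (b : Int) (q : Int) : Prop := a = 0 ∨ b ≠ 0
instance (a : Int) (b : Int) (q : Int) : Decidable (Pre_compute_period_py a b q) := by
  unfold Pre_compute_period_py; infer_instance

def pvWitness_compute_period_py : Int × Int × Int := (1, 6, 10)

def Spec_compute_period_py (a : Int) (b : Int) (q : Int) (out : Int × Int) : Prop := out = compute_period_py_alt a b q
instance (a : Int) (b : Int) (q : Int) (out : Int × Int) : Decidable (Spec_compute_period_py a b q out) := by unfold Spec_compute_period_py; infer_instance

-- ===== CLAIM (what is proved, stated in full; the proofs are below) =====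
def Claim_equal_compute_period_py : Prop := ∀ (a : Int) (b : Int) (q : Int), Dom_compute_period_py a b q → Pre_compute_period_py a b q → Spec_compute_period_py a b q (compute_period_py a b q)

-- ===== LEMMAS AND PROOFS =====

-- the trajectory a, f a, f (f a), …  with f = pvStep b q
def pseq (a b q : Int) : Nat → Int
  | 0 => a
  | n+1 => pvStep b q (pseq a b q n)

-- the dictionary A has built after n iterations
def dictOf (a b q : Int) : Nat → PySem.Dict Int Int
  | 0 => PySem.Dict.empty
  | n+1 => (dictOf a b q n).insert (pseq a b q n) (n : Int)

lemma pvStep_bounds (b q x : Int) (hb : b ≠ 0) :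
    (pvStep b q x).natAbs < b.natAbs ∧ (0 < b → 0 ≤ pvStep b q x) ∧ (b < 0 → pvStep b q x ≤ 0) := by
  unfold pvStep
  rcases lt_trichotomy b 0 with h | h | h
  · have := PySem.Int.mod_neg_bounds (a := x * q) h
    refine ⟨by omega, by omega, fun _ => this.2⟩
  · exact absurd h hb
  · have h1 := PySem.Int.mod_nonneg (a := x * q) h
    have h2 := PySem.Int.mod_lt (a := x * q) h
    refine ⟨by omega, fun _ => h1, by omega⟩

lemma pvStep_zero (b q : Int) (hb : b ≠ 0) : pvStep b q 0 = 0 := by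
  unfold pvStep
  rw [zero_mul, PySem.Int.mod_eq_zero_iff_dvd]
  exact dvd_zero b

lemma exists_repeat (a b q : Int) (hb : b ≠ 0) :
    ∃ n, (n ≤ b.natAbs + 1 ∧ ∃ p, p < n ∧ pseq a b q p = pseq a b q n) := by
  have hcard : (Finset.range b.natAbs).card < (Finset.range (b.natAbs + 1)).card := by
    simp
  have hmaps : ∀ i ∈ Finset.range (b.natAbs + 1),
      (pseq a b q (i + 1)).natAbs ∈ Finset.range b.natAbs := by
    intro i _
    have : pseq a b q (i + 1) = pvStep b q (pseq a b q i) := rfl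
    rw [Finset.mem_range, this]
    exact (pvStep_bounds b q _ hb).1
  obtain ⟨i, hi, j, hj, hne, heq⟩ :=
    Finset.exists_ne_map_eq_of_card_lt_of_maps_to hcard hmaps
  simp only [Finset.mem_range] at hi hj
  have hvi := pvStep_bounds b q (pseq a b q i) hb
  have hvj := pvStep_bounds b q (pseq a b q j) hb
  have hsi : pseq a b q (i + 1) = pvStep b q (pseq a b q i) := rfl
  have hsj : pseq a b q (j + 1) = pvStep b q (pseq a b q j) := rfl
  have heq' : pseq a b q (i + 1) = pseq a b q (j + 1) := by
    rw [hsi, hsj]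
    rcases lt_trichotomy b 0 with h | h | h
    · have b1 := hvi.2.2 h; have b2 := hvj.2.2 h
      rw [hsi, hsj] at heq
      omega
    · exact absurd h hb
    · have b1 := hvi.2.1 h; have b2 := hvj.2.1 h
      rw [hsi, hsj] at heq
      omega
  rcases Nat.lt_or_ge i j with h | h
  · exact ⟨j + 1, by omega, i + 1, by omega, heq'⟩
  · have : j < i := by omega
    exact ⟨i + 1, by omega, j + 1, by omega, heq'.symm⟩

-- ===== generic facts about the first repeat: N = first repeated index, P = its earlier twin, L = N - P =====

-- K1: once past P, the trajectory is (N-P)-periodic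
lemma seq_period (a b q : Int) (N P : Nat) (hPN : P < N)
    (hNP : pseq a b q P = pseq a b q N) :
    ∀ n, P ≤ n → pseq a b q (n + (N - P)) = pseq a b q n := by
  intro n hn
  induction n, hn using Nat.le_induction with
  | base =>
    have : P + (N - P) = N := by omega
    rw [this]; exact hNP.symm
  | succ n hn ih =>
    have : n + 1 + (N - P) = (n + (N - P)) + 1 := by omega
    rw [this]
    show pvStep b q (pseq a b q (n + (N - P))) = pvStep b q (pseq a b q n)
    rw [ih]

-- K2: multiples of the period
lemma seq_period_mul (a b q : Int) (N P : Nat) (hPN : P < N)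
    (hNP : pseq a b q P = pseq a b q N) :
    ∀ k n, P ≤ n → pseq a b q (n + k * (N - P)) = pseq a b q n := by
  intro k
  induction k with
  | zero => intro n _; simp
  | succ k ih =>
    intro n hn
    have : n + (k + 1) * (N - P) = (n + k * (N - P)) + (N - P) := by ring
    rw [this, seq_period a b q N P hPN hNP _ (by omega), ih n hn]

-- K4: any collision pseq u = pseq v (u < v) happens at u ≥ P with (N-P) ∣ (v - u)
lemma seq_collision (a b q : Int) (N P : Nat) (hPN : P < N)
    (hNP : pseq a b q P = pseq a b q N)
    (hinj : ∀ i j, i < j → j < N → pseq a b q i ≠ pseq a b q j) :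
    ∀ u v, u < v → pseq a b q u = pseq a b q v → P ≤ u ∧ (N - P) ∣ (v - u) := by
  have hL : 0 < N - P := by omega
  -- reduction of an index ≥ P into [P, N)
  have red : ∀ n, P ≤ n → pseq a b q n = pseq a b q (P + (n - P) % (N - P)) ∧
      P + (n - P) % (N - P) < N := by
    intro n hn
    constructor
    · have h1 := Nat.div_add_mod (n - P) (N - P)
      have h1' : ((n - P) / (N - P)) * (N - P) = (N - P) * ((n - P) / (N - P)) :=
        Nat.mul_comm _ _
      have h2 := seq_period_mul a b q N P hPN hNP ((n - P) / (N - P))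
        (P + (n - P) % (N - P)) (by omega)
      have h3 : P + (n - P) % (N - P) +
          (n - P) / (N - P) * (N - P) = n := by omega
      rw [h3] at h2
      exact h2
    · have := Nat.mod_lt (n - P) hL
      omega
  intro u v huv heq
  by_cases hvN : v < N
  · exact absurd heq (hinj u v huv hvN)
  · have hvP : P ≤ v := by omega
    obtain ⟨hv1, hv2⟩ := red v hvP
    by_cases huN : u < N
    · -- u must BE the reduced v
      have huP : u = P + (v - P) % (N - P) := by
        by_contra hne
        rcases Nat.lt_or_ge u (P + (v - P) % (N - P)) with h | h
        · exact hinj u _ h hv2 (heq.trans hv1)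
        · exact hinj _ u (by omega) huN (hv1.symm.trans heq.symm)
      constructor
      · omega
      · have hmod : (v - P) % (N - P) ≡ (v - P) [MOD (N - P)] := Nat.mod_modEq _ _
        have hd := (Nat.modEq_iff_dvd' (Nat.mod_le _ _)).mp hmod
        have : v - u = (v - P) - (v - P) % (N - P) := by omega
        rw [this]; exact hd
    · have huP : P ≤ u := by omega
      obtain ⟨hu1, hu2⟩ := red u huP
      have hrr : P + (u - P) % (N - P) = P + (v - P) % (N - P) := by
        by_contra hne
        rcases Nat.lt_or_ge (P + (u - P) % (N - P)) (P + (v - P) % (N - P)) with h | h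
        · exact hinj _ _ h hv2 ((hu1.symm.trans heq).trans hv1)
        · exact hinj _ _ (by omega) hu2 ((hv1.symm.trans heq.symm).trans hu1)
      refine ⟨huP, ?_⟩
      have hmeq : (u - P) ≡ (v - P) [MOD (N - P)] := by
        unfold Nat.ModEq
        omega
      have hd := (Nat.modEq_iff_dvd' (by omega)).mp hmeq
      have : v - u = (v - P) - (u - P) := by omega
      rw [this]; exact hd

-- dictionary characterisation
lemma dictOf_get_none (a b q : Int) (n : Nat) (x : Int)
    (h : ∀ i, i < n → pseq a b q i ≠ x) : (dictOf a b q n).get? x = none := by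
  induction n with
  | zero => rfl
  | succ n ih =>
    show ((dictOf a b q n).insert (pseq a b q n) (n : Int)).get? x = none
    rw [PySem.Dict.get?_insert_of_ne _ _ (fun hx => h n (by omega) hx.symm)]
    exact ih (fun i hi => h i (by omega))

lemma dictOf_get_some (a b q : Int) (N : Nat)
    (hinj : ∀ i j, i < j → j < N → pseq a b q i ≠ pseq a b q j) :
    ∀ n, n ≤ N → ∀ i, i < n → (dictOf a b q n).get? (pseq a b q i) = some (i : Int) := by
  intro n
  induction n with
  | zero => intro _ i hi; omega
  | succ n ih =>
    intro hn i hi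
    show ((dictOf a b q n).insert (pseq a b q n) (n : Int)).get? (pseq a b q i) = some (i : Int)
    by_cases hcase : i = n
    · subst hcase; exact PySem.Dict.get?_insert_self _ _ _
    · have hilt : i < n := by omega
      rw [PySem.Dict.get?_insert_of_ne _ _ (hinj i n hilt (by omega))]
      exact ih (by omega) i hilt

-- A's loop: from state n it returns (P, 0 or N-P) according to whether the cycle value is 0
lemma loopA_eq (a b q : Int) (hb : b ≠ 0) (N P : Nat) (hPN : P < N)
    (hNP : pseq a b q P = pseq a b q N)
    (hinj : ∀ i j, i < j → j < N → pseq a b q i ≠ pseq a b q j) :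
    ∀ fuel n, n ≤ N → (∀ i, i < n → pseq a b q i ≠ 0) → N - n < fuel →
      computeLoopA b q fuel (dictOf a b q n) (pseq a b q n) (n : Int) =
        ((P : Int), if pseq a b q P = 0 then 0 else ((N : Int) - (P : Int))) := by
  intro fuel
  induction fuel with
  | zero => intro n _ _ h; omega
  | succ fu ih =>
    intro n hnN hz hfuel
    rw [computeLoopA]
    by_cases h0 : pseq a b q n = 0
    · -- reaching 0: show n = P and pseq P = 0
      have hfix : pseq a b q n = pseq a b q (n + 1) := by
        show pseq a b q n = pvStep b q (pseq a b q n)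
        rw [h0, pvStep_zero b q hb]
      obtain ⟨hPn, hdvd⟩ := seq_collision a b q N P hPN hNP hinj n (n + 1) (by omega) hfix
      have hd1 : (N - P) ∣ 1 := by
        have : n + 1 - n = 1 := by omega
        rwa [this] at hdvd
      have hL1 : N - P = 1 := Nat.dvd_one.mp hd1
      have hnP : n = P := by
        by_contra hne
        have hPlt : P < n := by omega
        have h2 := seq_period_mul a b q N P hPN hNP (n - P) P (le_refl P)
        have h3 : P + (n - P) * (N - P) = n := by
          rw [hL1]; omega
        rw [h3] at h2
        exact hz P hPlt (h2.symm.trans h0)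
      subst hnP
      rw [if_pos h0, if_pos h0]
    · rw [if_neg h0]
      by_cases hnlt : n < N
      · -- no earlier occurrence of pseq n: dict lookup misses, loop continues
        have hnone : (dictOf a b q n).get? (pseq a b q n) = none :=
          dictOf_get_none a b q n _ (fun i hi => hinj i n hi hnlt)
        rw [hnone]
        have hstep : pvStep b q (pseq a b q n) = pseq a b q (n + 1) := rfl
        have hdict : (dictOf a b q n).insert (pseq a b q n) (n : Int) = dictOf a b q (n + 1) := rfl
        have hcast : (n : Int) + 1 = ((n + 1 : Nat) : Int) := by push_cast; ring
        rw [hstep, hdict, hcast]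
        exact ih (n + 1) (by omega) (fun i hi => by
          by_cases hc : i = n
          · subst hc; exact h0
          · exact hz i (by omega)) (by omega)
      · -- n = N: the dict holds pseq P = pseq N at index P
        have hnN : N = n := by omega
        subst hnN
        have hsome : (dictOf a b q N).get? (pseq a b q N) = some (P : Int) := by
          rw [← hNP]
          exact dictOf_get_some a b q N hinj N (le_refl N) P hPN
        rw [hsome]
        have hPne : pseq a b q P ≠ 0 := by rw [hNP]; exact h0
        rw [if_neg hPne]

-- generic run of a fueled while loop along a state trajectory g
lemma pyWhile_eq {α : Type} (test : α → Bool) (body : α → α) (g : Nat → α) (k : Nat)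
    (hg : ∀ j, j < k → body (g j) = g (j + 1))
    (hk : test (g k) = false) (hlt : ∀ j, j < k → test (g j) = true) :
    ∀ fuel n, n ≤ k → k - n < fuel → pyWhile test body fuel (g n) = g k := by
  intro fuel
  induction fuel with
  | zero => intro n _ h; omega
  | succ fu ih =>
    intro n hn hfuel
    by_cases hcase : n = k
    · subst hcase
      rw [pyWhile, hk]
      simp
    · have hnk : n < k := by omega
      rw [pyWhile, hlt n hnk]
      simp only [if_true]
      rw [hg n hnk]
      exact ih (n + 1) (by omega) (by omega)

-- Phase 1: the tortoise/hare loop stops at the first meeting index m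
lemma phase1_eq (a b q : Int) (N P m : Nat) (hPN : P < N) (hNle : N ≤ b.natAbs + 1)
    (hm0 : 0 < m) (hmle : m ≤ N)
    (hmeq : pseq a b q m = pseq a b q (2 * m))
    (hmmin : ∀ j, 0 < j → j < m → pseq a b q j ≠ pseq a b q (2 * j)) :
    pyWhile (fun s : Int × Int => s.1 != s.2)
      (fun s => (pvStep b q s.1, pvStep b q (pvStep b q s.2))) (b.natAbs + 2)
      (pvStep b q a, pvStep b q (pvStep b q a)) =
      (pseq a b q m, pseq a b q (2 * m)) := by
  have h := pyWhile_eq (fun s : Int × Int => s.1 != s.2)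
    (fun s => (pvStep b q s.1, pvStep b q (pvStep b q s.2)))
    (fun j => (pseq a b q (j + 1), pseq a b q (2 * j + 2))) (m - 1)
    (by
      intro j _
      show (pvStep b q (pseq a b q (j + 1)), pvStep b q (pvStep b q (pseq a b q (2 * j + 2)))) = _
      have e2 : 2 * j + 2 + 1 + 1 = 2 * (j + 1) + 2 := by omega
      show (pseq a b q (j + 1 + 1), pseq a b q (2 * j + 2 + 1 + 1)) = _
      rw [e2])
    (by
      have e1 : m - 1 + 1 = m := by omega
      have e2 : 2 * (m - 1) + 2 = 2 * m := by omega
      simp only [e1, e2]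
      simp [hmeq])
    (by
      intro j hj
      have e2 : 2 * j + 2 = 2 * (j + 1) := by omega
      simp only [e2]
      simp only [bne_iff_ne, ne_eq]
      exact fun hcon => hmmin (j + 1) (by omega) (by omega) hcon)
    (b.natAbs + 2) 0 (by omega) (by omega)
  have e1 : m - 1 + 1 = m := by omega
  have e2 : 2 * (m - 1) + 2 = 2 * m := by omega
  simpa only [e1, e2] using h

-- Phase 2: advancing both pointers from the start finds the pre-period P
lemma phase2_eq (a b q : Int) (N P m : Nat) (hPN : P < N) (hNle : N ≤ b.natAbs + 1)
    (hNP : pseq a b q P = pseq a b q N)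
    (hinj : ∀ i j, i < j → j < N → pseq a b q i ≠ pseq a b q j)
    (hm0 : 0 < m) (hmdvd : (N - P) ∣ m) :
    pyWhile (fun s : Int × Int × Int => s.1 != s.2.1)
      (fun s => (pvStep b q s.1, pvStep b q s.2.1, s.2.2 + 1)) (b.natAbs + 2)
      (a, pseq a b q (2 * m), 0) =
      (pseq a b q P, pseq a b q (2 * m + P), (P : Int)) := by
  have h := pyWhile_eq (fun s : Int × Int × Int => s.1 != s.2.1)
    (fun s => (pvStep b q s.1, pvStep b q s.2.1, s.2.2 + 1))
    (fun j => (pseq a b q j, pseq a b q (2 * m + j), (j : Int))) P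
    (by
      intro j _
      show (pvStep b q (pseq a b q j), pvStep b q (pseq a b q (2 * m + j)), (j : Int) + 1) = _
      show (pseq a b q (j + 1), pseq a b q (2 * m + j + 1), (j : Int) + 1) = _
      have e1 : 2 * m + j + 1 = 2 * m + (j + 1) := by omega
      have e2 : ((j : Int) + 1) = ((j + 1 : Nat) : Int) := by push_cast; ring
      rw [e1, e2])
    (by
      obtain ⟨c, hc⟩ := hmdvd
      have h2 := seq_period_mul a b q N P hPN hNP (2 * c) P (le_refl P)
      have hcc : 2 * c * (N - P) = 2 * ((N - P) * c) := by ring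
      have e : P + 2 * c * (N - P) = 2 * m + P := by omega
      rw [e] at h2
      simp [h2])
    (by
      intro j hj
      simp only [bne_iff_ne, ne_eq]
      intro hcon
      have := (seq_collision a b q N P hPN hNP hinj j (2 * m + j) (by omega) hcon).1
      omega)
    (b.natAbs + 2) 0 (by omega) (by omega)
  exact h

-- Phase 3: walking once around the cycle measures the period N - P
lemma phase3_eq (a b q : Int) (N P : Nat) (hPN : P < N) (hNle : N ≤ b.natAbs + 1)
    (hNP : pseq a b q P = pseq a b q N)
    (hinj : ∀ i j, i < j → j < N → pseq a b q i ≠ pseq a b q j) :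
    pyWhile (fun s : Int × Int => s.1 != pseq a b q P)
      (fun s => (pvStep b q s.1, s.2 + 1)) (b.natAbs + 2)
      (pvStep b q (pseq a b q P), 1) =
      (pseq a b q N, ((N - P : Nat) : Int)) := by
  have h := pyWhile_eq (fun s : Int × Int => s.1 != pseq a b q P)
    (fun s => (pvStep b q s.1, s.2 + 1))
    (fun j => (pseq a b q (P + 1 + j), ((j + 1 : Nat) : Int))) (N - P - 1)
    (by
      intro j _
      show (pvStep b q (pseq a b q (P + 1 + j)), ((j + 1 : Nat) : Int) + 1) = _
      show (pseq a b q (P + 1 + j + 1), ((j + 1 : Nat) : Int) + 1) = _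
      have e1 : P + 1 + j + 1 = P + 1 + (j + 1) := by omega
      have e2 : ((j + 1 : Nat) : Int) + 1 = ((j + 1 + 1 : Nat) : Int) := by push_cast; ring
      rw [e1, e2])
    (by
      have e1 : P + 1 + (N - P - 1) = N := by omega
      simp only [e1]
      simp [hNP.symm])
    (by
      intro j hj
      simp only [bne_iff_ne, ne_eq]
      intro hcon
      obtain ⟨-, hdvd⟩ := seq_collision a b q N P hPN hNP hinj P (P + 1 + j)
        (by omega) (hcon.symm)
      have e : P + 1 + j - P = j + 1 := by omega
      rw [e] at hdvd
      have := Nat.le_of_dvd (by omega) hdvd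
      omega)
    (b.natAbs + 2) 0 (by omega) (by omega)
  have e1 : P + 1 + (N - P - 1) = N := by omega
  have e2 : N - P - 1 + 1 = N - P := by omega
  simpa only [e1, e2] using h

-- ===== VERDICT (by name: the statement is the Claim_ definition above) =====
theorem compute_period_py_spec : Claim_equal_compute_period_py := by
  intro a b q _ hpre
  unfold Spec_compute_period_py
  by_cases ha : a = 0
  · subst ha
    have hA : compute_period_py 0 b q = (0, 0) := by
      show computeLoopA b q (b.natAbs + 1 + 1) PySem.Dict.empty 0 0 = (0, 0)
      rw [computeLoopA]
      simp
    have hB : compute_period_py_alt 0 b q = (0, 0) := by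
      simp [compute_period_py_alt]
    rw [hA, hB]
  · have hb : b ≠ 0 := hpre.resolve_left ha
    -- N = first repeated index, P = its earlier twin
    have hex : ∃ n, ∃ p, p < n ∧ pseq a b q p = pseq a b q n := by
      obtain ⟨n, _, hp⟩ := exists_repeat a b q hb
      exact ⟨n, hp⟩
    obtain ⟨P, hPN, hNP⟩ := Nat.find_spec hex
    set N := Nat.find hex with hNdef
    have hinj : ∀ i j, i < j → j < N → pseq a b q i ≠ pseq a b q j := by
      intro i j hij hj heq
      exact Nat.find_min hex hj ⟨i, hij, heq⟩
    have hNle : N ≤ b.natAbs + 1 := by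
      obtain ⟨n0, hn0, hp0⟩ := exists_repeat a b q hb
      exact le_trans (Nat.find_le hp0) hn0
    -- the tortoise/hare meeting index m
    have hLpos : 0 < N - P := by omega
    have hmex : ∃ i, 0 < i ∧ pseq a b q i = pseq a b q (2 * i) := by
      refine ⟨(N - P) * ((P - 1) / (N - P)) + (N - P), ?_, ?_⟩
      · omega
      · have hdm := Nat.div_add_mod (P - 1) (N - P)
        have hml := Nat.mod_lt (P - 1) hLpos
        have hdvd : (N - P) ∣ ((N - P) * ((P - 1) / (N - P)) + (N - P)) :=
          ⟨(P - 1) / (N - P) + 1, by ring⟩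
        obtain ⟨c, hc⟩ := hdvd
        have h2 := seq_period_mul a b q N P hPN hNP c
          ((N - P) * ((P - 1) / (N - P)) + (N - P)) (by omega)
        have hcc : c * (N - P) = (N - P) * c := by ring
        have e : (N - P) * ((P - 1) / (N - P)) + (N - P) + c * (N - P) =
            2 * ((N - P) * ((P - 1) / (N - P)) + (N - P)) := by omega
        rw [e] at h2
        exact h2.symm
    obtain ⟨hm0, hmeq⟩ := Nat.find_spec hmex
    set m := Nat.find hmex with hmdef
    have hmmin : ∀ j, 0 < j → j < m → pseq a b q j ≠ pseq a b q (2 * j) := by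
      intro j hj0 hjm heq
      exact Nat.find_min hmex hjm ⟨hj0, heq⟩
    have hmle : m ≤ N := by
      have hwit := hmex.choose_spec
      have hdm := Nat.div_add_mod (P - 1) (N - P)
      have hml := Nat.mod_lt (P - 1) hLpos
      have : (N - P) * ((P - 1) / (N - P)) + (N - P) ≤ N := by omega
      calc m ≤ (N - P) * ((P - 1) / (N - P)) + (N - P) := by
              apply Nat.find_le
              constructor
              · omega
              · -- same computation as in hmex
                have hdvd : (N - P) ∣ ((N - P) * ((P - 1) / (N - P)) + (N - P)) :=
                  ⟨(P - 1) / (N - P) + 1, by ring⟩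
                obtain ⟨c, hc⟩ := hdvd
                have h2 := seq_period_mul a b q N P hPN hNP c
                  ((N - P) * ((P - 1) / (N - P)) + (N - P)) (by omega)
                have hcc : c * (N - P) = (N - P) * c := by ring
                have e : (N - P) * ((P - 1) / (N - P)) + (N - P) + c * (N - P) =
                    2 * ((N - P) * ((P - 1) / (N - P)) + (N - P)) := by omega
                rw [e] at h2
                exact h2.symm
           _ ≤ N := this
    obtain ⟨hPm, hmdvd⟩ : P ≤ m ∧ (N - P) ∣ m := by
      have h := seq_collision a b q N P hPN hNP hinj m (2 * m) (by omega) hmeq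
      have e : 2 * m - m = m := by omega
      rw [e] at h
      exact h
    -- A's side
    have hA := loopA_eq a b q hb N P hPN hNP hinj (b.natAbs + 2) 0 (by omega)
      (by omega) (by omega)
    have hA' : compute_period_py a b q =
        ((P : Int), if pseq a b q P = 0 then 0 else ((N : Int) - (P : Int))) := hA
    -- B's side
    have hB : compute_period_py_alt a b q =
        ((P : Int), if pseq a b q P = 0 then 0 else ((N : Int) - (P : Int))) := by
      have h1 := phase1_eq a b q N P m hPN hNle hm0 hmle hmeq hmmin
      have h2 := phase2_eq a b q N P m hPN hNle hNP hinj hm0 hmdvd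
      have h3 := phase3_eq a b q N P hPN hNle hNP hinj
      simp only [compute_period_py_alt, if_neg ha, h1, h2, h3]
      by_cases hz : pseq a b q P = 0
      · rw [if_pos hz, if_pos hz]
      · rw [if_neg hz, if_neg hz]
        have : ((N - P : Nat) : Int) = (N : Int) - (P : Int) := by
          push_cast [Nat.cast_sub hPN.le]
          ring
        rw [this]
    rw [hA', hB]
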